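-- pv_equiv track=rewrite | github.com/Wafflenaut/aquarius-job-hunt | server/aquarius-scraper.py | getNthElement
-- ===== SOURCE A (Python) =====
-- def getNthElement(_body, _nth, _tag):
--
--     tag = "<" + _tag
--     index = 0
--     for i in range(0, _nth):
--         index = _body.find(tag, index)\
--
--
--         if(index == -1):
--             return ""
--         else:
--             index += len(tag)
--
--     #find end of tag
--     index = _body.find('>', index) + 1
--
--     element = _body[index: _body.find('</' + _tag + '>', index)]
--     return element
-- ===== SOURCE B (Python) =====
-- def getNthElement(_body, _nth, _tag):
--     tag = "<" + _tag
--     parts = _body.split(tag)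
--     if _nth > 0:
--         if _nth > len(parts) - 1:
--             return ""
--         index = sum(map(len, parts[:_nth])) + _nth * len(tag)
--     else:
--         index = 0
--     index = _body.find('>', index) + 1
--     return _body[index: _body.find('</' + _tag + '>', index)]
-- ===== Notes on version B (the rewrite author's own statement) =====
-- stated objective: alternative
-- what changed: The repeated find-and-advance loop over occurrence indices is replaced by a single str.split on the opening tag: the occurrence count is len(parts)-1 and the start index is recovered by summing the part lengths, with the same tail extraction.
import Mathlib
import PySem

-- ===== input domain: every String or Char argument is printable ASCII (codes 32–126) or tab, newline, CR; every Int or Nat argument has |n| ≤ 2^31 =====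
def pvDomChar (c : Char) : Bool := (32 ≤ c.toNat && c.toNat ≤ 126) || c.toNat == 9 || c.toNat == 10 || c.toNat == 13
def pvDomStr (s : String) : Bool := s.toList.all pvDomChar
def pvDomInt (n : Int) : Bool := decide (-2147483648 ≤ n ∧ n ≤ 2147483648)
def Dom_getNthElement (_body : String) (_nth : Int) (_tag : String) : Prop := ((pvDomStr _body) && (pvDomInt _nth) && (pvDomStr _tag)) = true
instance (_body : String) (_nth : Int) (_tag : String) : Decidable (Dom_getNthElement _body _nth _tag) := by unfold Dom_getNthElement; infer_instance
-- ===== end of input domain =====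

-- B replaces A's repeated find-and-advance loop by a single split on the opening tag,
-- recovering the start index from the part lengths (alternative decomposition, same cost).


-- ===== PORT A =====
-- A's for-loop over range(0, _nth), carrying `index`; returns none on the early `return ""`.
def getNthElementLoop (body tag : List Char) : Nat → Int → Option Int
  | 0, index => some index
  | n + 1, index =>
    let f := PySem.Chars.findFrom body tag index none
    if f = -1 then none
    else getNthElementLoop body tag n (f + tag.length)

def getNthElement (_body : String) (_nth : Int) (_tag : String) : String :=
  let body := _body.toList
  let tag := '<' :: _tag.toList
  match getNthElementLoop body tag _nth.toNat 0 with
  | none => ""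
  | some index =>
    let index := PySem.Chars.findFrom body ['>'] index none + 1
    String.ofList (PySem.List.slice body (some index)
      (some (PySem.Chars.findFrom body ('<' :: '/' :: (_tag.toList ++ ['>'])) index none)))

-- ===== PORT B =====
def getNthElement_alt (_body : String) (_nth : Int) (_tag : String) : String :=
  let body := _body.toList
  let tag := '<' :: _tag.toList
  let parts := PySem.Chars.splitOn body tag
  let index? : Option Int :=
    if _nth > 0 then
      if _nth > (parts.length : Int) - 1 then none
      else some (((PySem.List.slice parts none (some _nth)).map
                    (fun p => (p.length : Int))).sum + _nth * tag.length)
    else some 0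
  match index? with
  | none => ""
  | some index =>
    let index := PySem.Chars.findFrom body ['>'] index none + 1
    String.ofList (PySem.List.slice body (some index)
      (some (PySem.Chars.findFrom body ('<' :: '/' :: (_tag.toList ++ ['>'])) index none)))

-- ===== PRECONDITION & SPEC =====
def Spec_getNthElement (_body : String) (_nth : Int) (_tag : String) (out : String) : Prop := out = getNthElement_alt _body _nth _tag
instance (_body : String) (_nth : Int) (_tag : String) (out : String) : Decidable (Spec_getNthElement _body _nth _tag out) := by unfold Spec_getNthElement; infer_instance

-- ===== CLAIM (what is proved, stated in full; the proofs are below) =====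
def Claim_equal_getNthElement : Prop := ∀ (_body : String) (_nth : Int) (_tag : String), Dom_getNthElement _body _nth _tag → Spec_getNthElement _body _nth _tag (getNthElement _body _nth _tag)

-- ===== LEMMAS AND PROOFS =====

def pieces (x : Char) (xs : List Char) : List Char → List (List Char)
  | [] => [[]]
  | c :: rest =>
    if (x :: xs).isPrefixOf (c :: rest) then
      [] :: pieces x xs (rest.drop xs.length)
    else
      match pieces x xs rest with
      | p :: ps => (c :: p) :: ps
      | [] => [[]]
  termination_by l => l.length
  decreasing_by
    all_goals simp only [List.length_drop, List.length_cons]; omega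

def relIdx (sep : List Char) : Nat → List Char → Option Nat
  | 0, _ => some 0
  | n + 1, l =>
    let f := PySem.Chars.find l sep
    if f = -1 then none
    else (relIdx sep n (l.drop (f.toNat + sep.length))).map (fun r => f.toNat + sep.length + r)

theorem find_eq_of (s sub : List Char) (j : Nat) (h1 : sub <+: s.drop j)
    (h2 : ∀ i < j, ¬ sub <+: s.drop i) : PySem.Chars.find s sub = j := by
  have hinf : sub <:+: s := h1.isInfix.trans (List.drop_suffix j s).isInfix
  have hn : 0 ≤ PySem.Chars.find s sub := (PySem.Chars.find_nonneg_iff s sub).2 hinf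
  obtain ⟨hocc, hmin⟩ := PySem.Chars.find_spec hn
  have : (PySem.Chars.find s sub).toNat = j := by
    rcases Nat.lt_trichotomy (PySem.Chars.find s sub).toNat j with hlt | heq | hgt
    · exact absurd hocc (h2 _ hlt)
    · exact heq
    · exact absurd h1 (hmin j hgt)
  omega

theorem find_eq_zero_of_prefix (s sub : List Char) (h : sub <+: s) :
    PySem.Chars.find s sub = 0 := find_eq_of s sub 0 (by simpa) (by omega)

theorem find_cons (c : Char) (rest sub : List Char) (hnp : ¬ sub <+: (c :: rest)) :
    PySem.Chars.find (c :: rest) sub =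
      if PySem.Chars.find rest sub = -1 then -1 else 1 + PySem.Chars.find rest sub := by
  by_cases hinfix : sub <:+: rest
  · have hn : 0 ≤ PySem.Chars.find rest sub := (PySem.Chars.find_nonneg_iff rest sub).2 hinfix
    obtain ⟨hocc, hmin⟩ := PySem.Chars.find_spec hn
    rw [if_neg (by omega)]
    have := find_eq_of (c :: rest) sub ((PySem.Chars.find rest sub).toNat + 1)
      (by simpa using hocc)
      (by
        intro i hi
        cases i with
        | zero => simpa using hnp
        | succ i' => simpa using hmin i' (by omega))
    omega
  · have h1 : PySem.Chars.find rest sub = -1 := (PySem.Chars.find_eq_neg_one_iff rest sub).2 hinfix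
    rw [if_pos h1]
    refine (PySem.Chars.find_eq_neg_one_iff _ _).2 ?_
    intro hc
    rcases List.infix_cons_iff.1 hc with hp | hi
    · exact hnp hp
    · exact hinfix hi

theorem pieces_ne_nil (x : Char) (xs : List Char) (l : List Char) : pieces x xs l ≠ [] := by
  cases l with
  | nil => simp [pieces]
  | cons c rest =>
    rw [pieces]
    split
    · simp
    · split <;> simp

theorem pieces_of_find_neg (x : Char) (xs l : List Char)
    (h : PySem.Chars.find l (x :: xs) = -1) : pieces x xs l = [l] := by
  induction l with
  | nil => simp [pieces]
  | cons c rest ih =>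
    have hni : ¬ (x :: xs) <:+: (c :: rest) := (PySem.Chars.find_eq_neg_one_iff _ _).1 h
    have hnp : ¬ (x :: xs) <+: (c :: rest) := fun hp => hni hp.isInfix
    have hnir : ¬ (x :: xs) <:+: rest := fun hi => hni (List.infix_cons_iff.2 (Or.inr hi))
    have hrest : pieces x xs rest = [rest] :=
      ih ((PySem.Chars.find_eq_neg_one_iff _ _).2 hnir)
    rw [pieces, if_neg (by simpa [List.isPrefixOf_iff_prefix] using hnp), hrest]

theorem pieces_of_find_nonneg (x : Char) (xs l : List Char)
    (h : 0 ≤ PySem.Chars.find l (x :: xs)) :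
    pieces x xs l = l.take (PySem.Chars.find l (x :: xs)).toNat ::
      pieces x xs (l.drop ((PySem.Chars.find l (x :: xs)).toNat + (x :: xs).length)) := by
  induction l with
  | nil =>
    exfalso
    have hinf : (x :: xs) <:+: ([] : List Char) := (PySem.Chars.find_nonneg_iff _ _).1 h
    have := hinf.length_le
    simp at this
  | cons c rest ih =>
    by_cases hp : (x :: xs) <+: (c :: rest)
    · have h0 : PySem.Chars.find (c :: rest) (x :: xs) = 0 := find_eq_zero_of_prefix _ _ hp
      rw [pieces, if_pos (by simpa [List.isPrefixOf_iff_prefix] using hp), h0]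
      simp
    · have hc := find_cons c rest (x :: xs) hp
      have hr : PySem.Chars.find rest (x :: xs) ≠ -1 := by
        intro h1
        rw [hc, if_pos h1] at h
        omega
      have hrn : 0 ≤ PySem.Chars.find rest (x :: xs) := by
        have := PySem.Chars.neg_one_le_find rest (x :: xs)
        omega
      have hval : PySem.Chars.find (c :: rest) (x :: xs) = 1 + PySem.Chars.find rest (x :: xs) := by
        rw [hc, if_neg hr]
      have ihr := ih hrn
      rw [pieces, if_neg (by simpa [List.isPrefixOf_iff_prefix] using hp), ihr, hval]
      have hton : (1 + PySem.Chars.find rest (x :: xs)).toNat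
          = (PySem.Chars.find rest (x :: xs)).toNat + 1 := by omega
      simp [hton]
      have harr : (PySem.Chars.find rest (x :: xs)).toNat + 1 + (xs.length + 1)
          = ((PySem.Chars.find rest (x :: xs)).toNat + (xs.length + 1)) + 1 := by omega
      rw [harr, List.drop_succ_cons]

theorem relIdx_spec (x : Char) (xs : List Char) : ∀ (n : Nat) (l : List Char),
    (if n + 1 ≤ (pieces x xs l).length then
      relIdx (x :: xs) n l =
        some ((((pieces x xs l).take n).map List.length).sum + n * (x :: xs).length)
    else relIdx (x :: xs) n l = none) := by
  intro n
  induction n with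
  | zero =>
    intro l
    rw [if_pos (by
      have := pieces_ne_nil x xs l
      cases hp : pieces x xs l with
      | nil => exact absurd hp this
      | cons a as => simp)]
    simp [relIdx]
  | succ n ih =>
    intro l
    by_cases hneg : PySem.Chars.find l (x :: xs) = -1
    · rw [pieces_of_find_neg _ _ _ hneg, if_neg (by simp)]
      simp [relIdx, hneg]
    · have hnn : 0 ≤ PySem.Chars.find l (x :: xs) := by
        have := PySem.Chars.neg_one_le_find l (x :: xs)
        omega
      have hjl : (PySem.Chars.find l (x :: xs)).toNat ≤ l.length := by
        have := PySem.Chars.find_le_length l (x :: xs)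
        omega
      have hpf := pieces_of_find_nonneg x xs l hnn
      simp only [List.length_cons] at hpf
      rw [hpf]
      have ihl := ih (l.drop ((PySem.Chars.find l (x :: xs)).toNat + (xs.length + 1)))
      by_cases hle : n + 1 ≤ (pieces x xs (l.drop ((PySem.Chars.find l (x :: xs)).toNat + (xs.length + 1)))).length
      · rw [if_pos (by simp only [List.length_cons]; omega)]
        rw [if_pos hle] at ihl
        simp only [List.length_cons] at ihl ⊢
        simp [relIdx, hneg, ihl, List.length_take, Nat.min_eq_left hjl, Nat.succ_mul]
        generalize n * (xs.length + 1) = m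
        omega
      · rw [if_neg (by simp only [List.length_cons]; omega)]
        rw [if_neg hle] at ihl
        simp [relIdx, hneg, ihl]

theorem go_spec (x : Char) (xs : List Char) : ∀ (fuel : Nat) (l cur : List Char)
    (acc : List (List Char)), l.length ≤ fuel →
    PySem.Chars.splitOn.go (x :: xs) fuel l cur acc
      = acc.reverse ++ (pieces x xs l).modifyHead (fun p => cur.reverse ++ p) := by
  intro fuel
  induction fuel with
  | zero =>
    intro l cur acc h
    have hl : l = [] := List.eq_nil_of_length_eq_zero (by omega)
    subst hl
    simp [PySem.Chars.splitOn.go, pieces]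
  | succ fuel ih =>
    intro l cur acc h
    cases l with
    | nil => simp [PySem.Chars.splitOn.go, pieces]
    | cons c rest =>
      rw [PySem.Chars.splitOn.go]
      by_cases hp : (x :: xs).isPrefixOf (c :: rest)
      · rw [if_pos hp]
        have hrec := ih (List.drop (x :: xs).length (c :: rest)) [] (cur.reverse :: acc)
          (by simp at h ⊢; omega)
        rw [hrec]
        obtain ⟨p, ps, hps⟩ : ∃ p ps, pieces x xs (List.drop (x :: xs).length (c :: rest)) = p :: ps := by
          cases hq : pieces x xs (List.drop (x :: xs).length (c :: rest)) with
          | nil => exact absurd hq (pieces_ne_nil x xs _)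
          | cons a as => exact ⟨a, as, rfl⟩
        rw [pieces, if_pos hp]
        simp only [List.length_cons, List.drop_succ_cons] at hps ⊢
        rw [hps]
        simp
      · rw [if_neg hp]
        have hrec := ih rest (c :: cur) acc (by simp at h ⊢; omega)
        rw [hrec]
        obtain ⟨p, ps, hps⟩ : ∃ p ps, pieces x xs rest = p :: ps := by
          cases hq : pieces x xs rest with
          | nil => exact absurd hq (pieces_ne_nil x xs _)
          | cons a as => exact ⟨a, as, rfl⟩
        rw [pieces, if_neg hp, hps]
        simp

theorem splitOn_eq (x : Char) (xs body : List Char) :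
    PySem.Chars.splitOn body (x :: xs) = pieces x xs body := by
  unfold PySem.Chars.splitOn
  rw [go_spec x xs (body.length + 1) body [] [] (by omega)]
  obtain ⟨p, ps, hps⟩ : ∃ p ps, pieces x xs body = p :: ps := by
    cases hq : pieces x xs body with
    | nil => exact absurd hq (pieces_ne_nil x xs _)
    | cons a as => exact ⟨a, as, rfl⟩
  rw [hps]
  simp

theorem loop_eq (body : List Char) (x : Char) (xs : List Char) : ∀ (n : Nat) (k : Nat),
    k ≤ body.length →
    getNthElementLoop body (x :: xs) n (k : Int)
      = (relIdx (x :: xs) n (body.drop k)).map (fun r => ((k + r : Nat) : Int)) := by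
  intro n
  induction n with
  | zero => intro k hk; simp [getNthElementLoop, relIdx]
  | succ n ih =>
    intro k hk
    have hff := PySem.Chars.findFrom_natCast body (x :: xs) k hk
    by_cases hf : PySem.Chars.find (body.drop k) (x :: xs) = -1
    · rw [if_pos hf] at hff
      simp [getNthElementLoop, relIdx, hff, hf]
    · rw [if_neg hf] at hff
      have hf0 : 0 ≤ PySem.Chars.find (body.drop k) (x :: xs) := by
        have := PySem.Chars.neg_one_le_find (body.drop k) (x :: xs)
        omega
      obtain ⟨hocc, -⟩ := PySem.Chars.find_spec hf0
      have hlen := hocc.length_le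
      simp only [List.drop_drop, List.length_drop, List.length_cons] at hlen
      have hk' : k + (PySem.Chars.find (List.drop k body) (x :: xs)).toNat + (xs.length + 1) ≤ body.length := by omega
      have hrec := ih (k + (PySem.Chars.find (List.drop k body) (x :: xs)).toNat + (xs.length + 1)) (by omega)
      rw [getNthElementLoop]
      simp only [hff]
      rw [if_neg (by omega)]
      have hcast : ((k : Int) + PySem.Chars.find (List.drop k body) (x :: xs) + ((x :: xs).length : Int))
          = ((k + (PySem.Chars.find (List.drop k body) (x :: xs)).toNat + (xs.length + 1) : Nat) : Int) := by
        simp only [List.length_cons]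
        omega
      rw [hcast, hrec]
      rw [relIdx]
      simp only [List.drop_drop]
      rw [if_neg hf]
      have hdrop : k + ((PySem.Chars.find (List.drop k body) (x :: xs)).toNat + (xs.length + 1)) = k + (PySem.Chars.find (List.drop k body) (x :: xs)).toNat + (xs.length + 1) := by omega
      simp only [List.length_cons, hdrop]
      cases relIdx (x :: xs) n (List.drop (k + (PySem.Chars.find (List.drop k body) (x :: xs)).toNat + (xs.length + 1)) body) with
      | none => simp
      | some r =>
        simp only [Option.map_some]
        congr 1
        omega

theorem sum_map_cast (l : List (List Char)) :
    (l.map (fun p => ((p.length : Nat) : Int))).sum = (((l.map List.length).sum : Nat) : Int) := by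
  induction l with
  | nil => simp
  | cons a as ih => simp [ih]

theorem getNth_eq (_body : String) (_nth : Int) (_tag : String) :
    getNthElement _body _nth _tag = getNthElement_alt _body _nth _tag := by
  unfold getNthElement getNthElement_alt
  dsimp only
  rw [splitOn_eq '<' _tag.toList _body.toList]
  by_cases hpos : _nth > 0
  · have hloop := loop_eq _body.toList '<' _tag.toList _nth.toNat 0 (by omega)
    simp only [List.drop_zero, Nat.zero_add] at hloop
    have h0 : ((0 : Nat) : Int) = 0 := rfl
    rw [h0] at hloop
    have hspec := relIdx_spec '<' _tag.toList _nth.toNat _body.toList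
    by_cases hle : _nth.toNat + 1 ≤ (pieces '<' _tag.toList _body.toList).length
    · rw [if_pos hle] at hspec
      rw [hspec] at hloop
      simp only [Option.map_some] at hloop
      have hval : (((((pieces '<' _tag.toList _body.toList).take _nth.toNat).map List.length).sum
              + _nth.toNat * ('<' :: _tag.toList).length : Nat) : Int)
          = ((PySem.List.slice (pieces '<' _tag.toList _body.toList) none (some _nth)).map
              (fun p => (p.length : Int))).sum + _nth * (('<' :: _tag.toList).length : Int) := by
        rw [PySem.List.slice_to, sum_map_cast, Int.natCast_add, Int.natCast_mul,
          Int.toNat_of_nonneg (Int.le_of_lt hpos)]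
        exact Int.le_of_lt hpos
      rw [hloop, if_pos hpos,
        if_neg (show ¬ _nth > ((pieces '<' _tag.toList _body.toList).length : Int) - 1 by omega),
        ← hval]
    · rw [if_neg hle] at hspec
      rw [hspec] at hloop
      rw [hloop, if_pos hpos,
        if_pos (show _nth > ((pieces '<' _tag.toList _body.toList).length : Int) - 1 by omega)]
      simp
  · have hz : _nth.toNat = 0 := by omega
    rw [hz, if_neg hpos]
    simp [getNthElementLoop]

-- ===== VERDICT (by name: the statement is the Claim_ definition above) =====
theorem getNthElement_spec : Claim_equal_getNthElement := by
  intro _body _nth _tag _hdom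
  unfold Spec_getNthElement
  exact getNth_eq _body _nth _tag
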